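-- pv_equiv track=rewrite | github.com/MrBrantCode/unitest_baseline | mut_generate/mist_train_taco/taco_19421/solution.py | maximal_prefix_subsequence_length
-- ===== SOURCE A (Python) =====
-- def maximal_prefix_subsequence_length(S: str, T: str) -> int:
--     count = 0
--     n = 0
--     for i in S:
--         for j in range(n, len(T)):
--             if T[j] == i:
--                 count += 1
--                 n = j + 1
--                 break
--         else:
--             break
--     return count
-- ===== SOURCE B (Python) =====
-- def maximal_prefix_subsequence_length(S: str, T: str) -> int:
--     pos = 0
--     for c in T:
--         if pos < len(S) and c == S[pos]:
--             pos += 1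
--     return pos
-- ===== Notes on version B (the rewrite author's own statement) =====
-- stated objective: simpler
-- what changed: B makes a single pass over T with one pointer into S (matched-prefix length), instead of A's outer loop over S with a nested index scan over T and break bookkeeping.
import Mathlib
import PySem

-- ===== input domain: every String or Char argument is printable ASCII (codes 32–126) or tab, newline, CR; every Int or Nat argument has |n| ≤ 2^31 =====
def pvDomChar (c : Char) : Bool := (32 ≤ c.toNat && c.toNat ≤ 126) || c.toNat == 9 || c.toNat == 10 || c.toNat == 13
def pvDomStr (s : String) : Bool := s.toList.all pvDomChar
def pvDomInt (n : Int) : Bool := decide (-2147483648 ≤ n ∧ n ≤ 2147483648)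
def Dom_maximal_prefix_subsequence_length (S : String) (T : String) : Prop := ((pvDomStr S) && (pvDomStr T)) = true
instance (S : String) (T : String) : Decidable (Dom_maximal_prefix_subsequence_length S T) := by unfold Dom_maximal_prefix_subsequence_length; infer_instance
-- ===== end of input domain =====

-- B replaces A's outer loop over S with nested index scan over T by a single pass
-- over T keeping one pointer into S (objective: simpler); same return value everywhere.

-- ===== PORT A =====
-- inner loop: `for j in range(n, len(T)): if T[j] == i: … break` — first j ≥ n with T[j] = i
def pvInnerA (LT : List Char) (i : Char) (j : Nat) : Option Nat :=
  if h : j < LT.length then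
    if LT[j] = i then some (j + 1) else pvInnerA LT i (j + 1)
  else none
termination_by LT.length - j
decreasing_by omega

-- outer loop: for i in S, with state (count, n); break when the inner loop finds nothing
def pvOuterA (LT : List Char) : List Char → Int → Nat → Int
  | [], count, _ => count
  | i :: rest, count, n =>
    match pvInnerA LT i n with
    | some n' => pvOuterA LT rest (count + 1) n'
    | none => count

def maximal_prefix_subsequence_length (S : String) (T : String) : Int :=
  pvOuterA T.toList S.toList 0 0

-- ===== PORT B =====
-- one step of B's single pass over T: advance the pointer into S on a match
def pvStepB (LS : List Char) (pos : Nat) (c : Char) : Nat :=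
  if h : pos < LS.length then (if c = LS[pos] then pos + 1 else pos) else pos

def maximal_prefix_subsequence_length_alt (S : String) (T : String) : Int :=
  ((T.toList.foldl (pvStepB S.toList) 0 : Nat) : Int)

-- ===== PRECONDITION & SPEC =====
def Spec_maximal_prefix_subsequence_length (S : String) (T : String) (out : Int) : Prop := out = maximal_prefix_subsequence_length_alt S T
instance (S : String) (T : String) (out : Int) : Decidable (Spec_maximal_prefix_subsequence_length S T out) := by unfold Spec_maximal_prefix_subsequence_length; infer_instance

-- ===== CLAIM (what is proved, stated in full; the proofs are below) =====
def Claim_equal_maximal_prefix_subsequence_length : Prop := ∀ (S : String) (T : String), Dom_maximal_prefix_subsequence_length S T → Spec_maximal_prefix_subsequence_length S T (maximal_prefix_subsequence_length S T)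

-- ===== LEMMAS AND PROOFS =====

-- the greedy longest-prefix-subsequence length, as a reference function
def pvGreedy : List Char → List Char → Nat
  | _, [] => 0
  | [], _ :: _ => 0
  | a :: s, b :: t => if b = a then pvGreedy s t + 1 else pvGreedy (a :: s) t

theorem pvGreedy_nil_right (s : List Char) : pvGreedy s [] = 0 := by
  cases s <;> simp [pvGreedy]

theorem pvGreedy_nil_left (t : List Char) : pvGreedy [] t = 0 := by
  cases t <;> simp [pvGreedy]

theorem pvFoldB_eq (t LS : List Char) : ∀ p : Nat,
    t.foldl (pvStepB LS) p = p + pvGreedy (LS.drop p) t := by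
  induction t with
  | nil => intro p; simp [pvGreedy_nil_right]
  | cons c t ih =>
    intro p
    by_cases h : p < LS.length
    · rw [List.drop_eq_getElem_cons h]
      by_cases hc : c = LS[p]
      · simp only [List.foldl_cons, pvStepB, dif_pos h, if_pos hc, ih (p + 1)]
        rw [pvGreedy, if_pos hc]
        omega
      · simp only [List.foldl_cons, pvStepB, dif_pos h, if_neg hc, ih p]
        rw [List.drop_eq_getElem_cons h, pvGreedy, if_neg hc]
    · have hnil : LS.drop p = [] := List.drop_eq_nil_of_le (by omega)
      simp only [List.foldl_cons, pvStepB, dif_neg h, ih p, hnil,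
        pvGreedy_nil_left]

theorem pvOuterA_eq (LT : List Char) : ∀ (s : List Char) (c : Int) (n : Nat),
    pvOuterA LT s c n = c + (pvGreedy s (LT.drop n) : Int) := by
  intro s
  induction s with
  | nil => intro c n; simp [pvOuterA, pvGreedy_nil_left]
  | cons i s ih =>
    intro c n
    suffices H : ∀ (m n : Nat) (c : Int), LT.length - n ≤ m →
        pvOuterA LT (i :: s) c n = c + (pvGreedy (i :: s) (LT.drop n) : Int) by
      exact H LT.length n c (by omega)
    intro m
    induction m with
    | zero =>
      intro n c hm
      have h : ¬ n < LT.length := by omega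
      have hnil : LT.drop n = [] := List.drop_eq_nil_of_le (by omega)
      rw [pvOuterA, pvInnerA, dif_neg h, hnil, pvGreedy_nil_right]
      simp
    | succ m ihm =>
      intro n c hm
      by_cases h : n < LT.length
      · rw [pvOuterA, pvInnerA, dif_pos h]
        by_cases hi : LT[n] = i
        · rw [if_pos hi]
          have hred : (match some (n + 1) with
              | some n' => pvOuterA LT s (c + 1) n'
              | none => c) = pvOuterA LT s (c + 1) (n + 1) := rfl
          rw [hred, ih (c + 1) (n + 1), List.drop_eq_getElem_cons h, pvGreedy,
            if_pos hi]
          push_cast; ring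
        · rw [if_neg hi]
          have : (match pvInnerA LT i (n + 1) with
              | some n' => pvOuterA LT s (c + 1) n'
              | none => c) = pvOuterA LT (i :: s) c (n + 1) := by
            rw [pvOuterA]
          rw [this, ihm (n + 1) c (by omega), List.drop_eq_getElem_cons h,
            pvGreedy, if_neg hi]
      · have hnil : LT.drop n = [] := List.drop_eq_nil_of_le (by omega)
        rw [pvOuterA, pvInnerA, dif_neg h, hnil, pvGreedy_nil_right]
        simp

-- ===== VERDICT (by name: the statement is the Claim_ definition above) =====
theorem maximal_prefix_subsequence_length_spec : Claim_equal_maximal_prefix_subsequence_length := by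
  intro S T _
  unfold Spec_maximal_prefix_subsequence_length maximal_prefix_subsequence_length
    maximal_prefix_subsequence_length_alt
  rw [pvOuterA_eq, pvFoldB_eq]
  simp
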